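-- pv_equiv track=rewrite | github.com/jaketanwh/gp | code/dog/data.py | day_xg_calculate
-- ===== SOURCE A (Python) =====
-- def day_xg_calculate(res):
--     _day10 = 0
--     _day20 = 0
--     _day30 = 0
--     _day40 = 0
--     _day50 = 0
--     _day60 = 0
--     i = 0
--     for _row in res:
--         val = _row[0]
--         if i < 10:
--             _day10 = max(_day10, val)
--         elif i < 20:
--             _day20 = max(_day20, val)
--         elif i < 30:
--             _day30 = max(_day30, val)
--         elif i < 40:
--             _day40 = max(_day40, val)
--         elif i < 50:
--             _day50 = max(_day50, val)
--         elif i < 60: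
--             _day60 = max(_day60, val)
--         i = i + 1
--         if i == 60:
--             break
--
--     _len = len(res)
--     if _len >= 60:
--         _day20 = max(_day10, _day20)
--         _day30 = max(_day20, _day30)
--         _day40 = max(_day30, _day40)
--         _day50 = max(_day40, _day50)
--         _day60 = max(_day50, _day60)
--     elif _len > 50:
--         _day20 = max(_day10, _day20)
--         _day30 = max(_day20, _day30)
--         _day40 = max(_day30, _day40)
--         _day50 = max(_day40, _day50)
--     elif _len > 40:
--         _day20 = max(_day10, _day20)
--         _day30 = max(_day20, _day30)
--         _day40 = max(_day30, _day40)
--     elif _len > 30: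
--         _day20 = max(_day10, _day20)
--         _day30 = max(_day20, _day30)
--     elif _len > 20:
--         _day20 = max(_day10, _day20)
--
--     _daylist = {}
--     _daylist['10'] = _day10
--     _daylist['20'] = _day20
--     _daylist['30'] = _day30
--     _daylist['40'] = _day40
--     _daylist['50'] = _day50
--     _daylist['60'] = _day60
--     return _daylist
-- ===== SOURCE B (Python) =====
-- def day_xg_calculate(res):
--     n = len(res)
--     c = 6 if n >= 60 else max(1, (n - 1) // 10)
--     out = {}
--     for k in range(6):
--         lo = 0 if k < c else 10 * k
--         out[str(10 * (k + 1))] = max([0] + [row[0] for row in res[lo:10 * (k + 1)]])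
--     return out
-- ===== Notes on version B (the rewrite author's own statement) =====
-- stated objective: simpler
-- what changed: Instead of a stateful single pass over rows with six named accumulators followed by five duplicated cascade ladders, B computes each of the six outputs independently and statelessly as a max over a list slice: a prefix slice res[0:10(k+1)] for the buckets the original cascades into, and the bucket's own window res[10k:10(k+1)] otherwise, with the cascade depth given by the closed form c = 6 if n>=60 else max(1,(n-1)//10).
import Mathlib
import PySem

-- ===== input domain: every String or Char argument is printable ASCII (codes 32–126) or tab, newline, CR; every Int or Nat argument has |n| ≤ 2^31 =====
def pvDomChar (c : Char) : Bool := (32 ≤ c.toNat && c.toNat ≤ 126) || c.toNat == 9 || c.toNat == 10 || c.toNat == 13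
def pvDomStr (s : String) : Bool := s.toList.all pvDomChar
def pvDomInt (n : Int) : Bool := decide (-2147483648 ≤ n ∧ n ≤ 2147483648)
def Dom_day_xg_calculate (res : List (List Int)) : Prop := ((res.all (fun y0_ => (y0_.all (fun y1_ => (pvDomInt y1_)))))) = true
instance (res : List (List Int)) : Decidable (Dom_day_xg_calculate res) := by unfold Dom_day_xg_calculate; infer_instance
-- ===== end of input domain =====

-- B replaces A's stateful pass with six accumulators plus cascade ladders by six independent
-- slice maxima (prefix slice or own 10-row window) with a closed-form cascade depth (objective: simpler).


-- ===== PORT A =====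
-- the for-loop with the running index i and the 'break' at i == 60
def pvLoopA : List (List Int) → Int → Int → Int → Int → Int → Int → Int →
    (Int × Int × Int × Int × Int × Int)
  | [], _, d10, d20, d30, d40, d50, d60 => (d10, d20, d30, d40, d50, d60)
  | row :: rest, i, d10, d20, d30, d40, d50, d60 =>
    let val := (PySem.List.pyGet? row 0).getD 0   -- row[0]; Pre_ guarantees the index is in range
    let s :=
      if i < 10 then (max d10 val, d20, d30, d40, d50, d60)
      else if i < 20 then (d10, max d20 val, d30, d40, d50, d60)
      else if i < 30 then (d10, d20, max d30 val, d40, d50, d60)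
      else if i < 40 then (d10, d20, d30, max d40 val, d50, d60)
      else if i < 50 then (d10, d20, d30, d40, max d50 val, d60)
      else if i < 60 then (d10, d20, d30, d40, d50, max d60 val)
      else (d10, d20, d30, d40, d50, d60)
    let i' := i + 1
    if i' == 60 then s
    else pvLoopA rest i' s.1 s.2.1 s.2.2.1 s.2.2.2.1 s.2.2.2.2.1 s.2.2.2.2.2

def day_xg_calculate (res : List (List Int)) : List (String × Int) :=
  let s := pvLoopA res 0 0 0 0 0 0 0
  let d10 := s.1
  let d20 := s.2.1
  let d30 := s.2.2.1
  let d40 := s.2.2.2.1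
  let d50 := s.2.2.2.2.1
  let d60 := s.2.2.2.2.2
  let _len : Int := (res.length : Int)
  let t :=
    if _len ≥ 60 then
      let d20 := max d10 d20
      let d30 := max d20 d30
      let d40 := max d30 d40
      let d50 := max d40 d50
      let d60 := max d50 d60
      (d20, d30, d40, d50, d60)
    else if _len > 50 then
      let d20 := max d10 d20
      let d30 := max d20 d30
      let d40 := max d30 d40
      let d50 := max d40 d50
      (d20, d30, d40, d50, d60)
    else if _len > 40 then
      let d20 := max d10 d20
      let d30 := max d20 d30
      let d40 := max d30 d40
      (d20, d30, d40, d50, d60)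
    else if _len > 30 then
      let d20 := max d10 d20
      let d30 := max d20 d30
      (d20, d30, d40, d50, d60)
    else if _len > 20 then
      let d20 := max d10 d20
      (d20, d30, d40, d50, d60)
    else (d20, d30, d40, d50, d60)
  (((((((PySem.Dict.empty.insert "10" d10).insert "20" t.1).insert "30" t.2.1).insert
      "40" t.2.2.1).insert "50" t.2.2.2.1).insert "60" t.2.2.2.2) : PySem.Dict String Int).items

-- ===== PORT B =====
-- Source B: out[str(10*(k+1))] = max([0] + [row[0] for row in res[lo : 10*(k+1)]]) for k in range(6)
def day_xg_calculate_alt (res : List (List Int)) : List (String × Int) :=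
  let n : Int := (res.length : Int)
  let c : Int := if n ≥ 60 then 6 else max 1 (PySem.Int.floordiv (n - 1) 10)
  (((PySem.List.pyRange 0 6 1).foldl (fun (out : PySem.Dict String Int) k =>
      let lo : Int := if k < c then 0 else 10 * k
      let vals := (PySem.List.slice res (some lo) (some (10 * (k + 1)))).map
        (fun row => (PySem.List.pyGet? row 0).getD 0)
      out.insert (PySem.Int.toStr (10 * (k + 1)))
        ((PySem.List.max? ((0 : Int) :: vals) id).getD 0))   -- max([0] + vals)
    PySem.Dict.empty) : PySem.Dict String Int).items

-- ===== PRECONDITION & SPEC =====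
-- Pre_ excludes exactly the inputs where Python A raises IndexError: an empty inner list
-- among the first 60 rows (rows past 60 are never touched thanks to the break).
def Pre_day_xg_calculate (res : List (List Int)) : Prop :=
  ∀ row ∈ res.take 60, row ≠ []
instance (res : List (List Int)) : Decidable (Pre_day_xg_calculate res) := by
  unfold Pre_day_xg_calculate; infer_instance
def pvWitness_day_xg_calculate : List (List Int) := [[3, 1], [5], [2]]

def Spec_day_xg_calculate (res : List (List Int)) (out : List (String × Int)) : Prop := out = day_xg_calculate_alt res
instance (res : List (List Int)) (out : List (String × Int)) : Decidable (Spec_day_xg_calculate res out) := by unfold Spec_day_xg_calculate; infer_instance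

-- ===== CLAIM (what is proved, stated in full; the proofs are below) =====
def Claim_equal_day_xg_calculate : Prop := ∀ (res : List (List Int)), Dom_day_xg_calculate res → Pre_day_xg_calculate res → Spec_day_xg_calculate res (day_xg_calculate res)

-- ===== LEMMAS AND PROOFS =====

-- first elements of the rows of the slice xs[a:b] (clamped at 0)
def pvSeg (xs : List (List Int)) (a b : Int) : List Int :=
  ((xs.drop a.toNat).take (b.toNat - a.toNat)).map (fun row => (PySem.List.pyGet? row 0).getD 0)

theorem pvSeg_nil (a b : Int) : pvSeg [] a b = [] := by
  simp [pvSeg]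

theorem pvSeg_nonpos (xs : List (List Int)) (a b : Int) (h : b ≤ 0) : pvSeg xs a b = [] := by
  have h1 : b.toNat - a.toNat = 0 := by omega
  simp [pvSeg, h1]

theorem pvFoldl_seg_nonpos (xs : List (List Int)) (a b d : Int) (h : b ≤ 0) :
    (pvSeg xs a b).foldl max d = d := by
  rw [pvSeg_nonpos xs a b h]
  rfl

theorem pvFoldl_congr_seed (l : List Int) {a b : Int} (h : a = b) :
    l.foldl max a = l.foldl max b := by rw [h]

theorem pvSeg_cons_foldl (row : List Int) (rest : List (List Int)) (a b d : Int) :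
    (pvSeg (row :: rest) a b).foldl max d =
      (pvSeg rest (a - 1) (b - 1)).foldl max
        (if a ≤ 0 ∧ 0 < b then max d ((PySem.List.pyGet? row 0).getD 0) else d) := by
  unfold pvSeg
  by_cases hb : 0 < b
  · by_cases ha : a ≤ 0
    · rw [if_pos ⟨ha, hb⟩]
      have h3 : b.toNat - a.toNat = ((b - 1).toNat - (a - 1).toNat) + 1 := by omega
      have h1 : a.toNat = 0 := by omega
      have h2 : (a - 1).toNat = 0 := by omega
      rw [h3, h1, h2]
      simp [List.take_succ_cons]
    · rw [if_neg (fun hc => ha hc.1)]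
      have h2 : b.toNat - a.toNat = (b - 1).toNat - (a - 1).toNat := by omega
      have h1 : a.toNat = (a - 1).toNat + 1 := by omega
      rw [h2, h1]
      simp [List.drop_succ_cons]
  · rw [if_neg (fun hc => hb hc.2)]
    have h1 : b.toNat - a.toNat = 0 := by omega
    have h2 : (b - 1).toNat - (a - 1).toNat = 0 := by omega
    rw [h1, h2]
    simp

theorem pvLoopA_eq (xs : List (List Int)) :
    ∀ (i d0 d1 d2 d3 d4 d5 : Int), 0 ≤ i → i < 60 →
    pvLoopA xs i d0 d1 d2 d3 d4 d5 =
      ((pvSeg xs (0 - i) (10 - i)).foldl max d0,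
       (pvSeg xs (10 - i) (20 - i)).foldl max d1,
       (pvSeg xs (20 - i) (30 - i)).foldl max d2,
       (pvSeg xs (30 - i) (40 - i)).foldl max d3,
       (pvSeg xs (40 - i) (50 - i)).foldl max d4,
       (pvSeg xs (50 - i) (60 - i)).foldl max d5) := by
  induction xs with
  | nil => intro i d0 d1 d2 d3 d4 d5 h0 h60; simp [pvLoopA, pvSeg_nil]
  | cons row rest ih =>
    intro i d0 d1 d2 d3 d4 d5 h0 h60
    rw [pvLoopA]
    rw [pvSeg_cons_foldl, pvSeg_cons_foldl, pvSeg_cons_foldl, pvSeg_cons_foldl,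
        pvSeg_cons_foldl, pvSeg_cons_foldl]
    have e0 : (0 - i) - 1 = 0 - (i + 1) := by ring
    have e1 : (10 - i) - 1 = 10 - (i + 1) := by ring
    have e2 : (20 - i) - 1 = 20 - (i + 1) := by ring
    have e3 : (30 - i) - 1 = 30 - (i + 1) := by ring
    have e4 : (40 - i) - 1 = 40 - (i + 1) := by ring
    have e5 : (50 - i) - 1 = 50 - (i + 1) := by ring
    have e6 : (60 - i) - 1 = 60 - (i + 1) := by ring
    rw [e0, e1, e2, e3, e4, e5, e6]
    by_cases hbr : i + 1 = 60
    · -- break: i = 59, only the last bucket is touched and the rest of the list is ignored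
      have h59 : i = 59 := by omega
      subst h59
      norm_num
      refine ⟨?_, ?_, ?_, ?_, ?_, ?_⟩ <;>
        simp [pvFoldl_seg_nonpos]
    · have hne : ¬ ((i + 1) == 60) = true := by simpa using hbr
      simp only [hne, if_false, Bool.false_eq_true]
      rw [ih (i + 1) _ _ _ _ _ _ (by omega) (by omega)]
      simp only [Prod.mk.injEq]
      refine ⟨?_, ?_, ?_, ?_, ?_, ?_⟩ <;>
        (apply pvFoldl_congr_seed; split_ifs <;> first | rfl | omega)

-- max? over (0 :: vals) is the 0-seeded fold of max (B's 'max([0] + vals)')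
theorem pvFoldF (f : Option Int → Int → Option Int)
    (hf : ∀ (q x : Int), f (some q) x = some (max q x)) (l : List Int) : ∀ (m : Int),
    List.foldl f (some m) l = some (l.foldl max m) := by
  induction l with
  | nil => intro m; rfl
  | cons x xs ih =>
    intro m
    simp only [List.foldl_cons, hf]
    exact ih (max m x)

theorem pvMaxZero (vals : List Int) :
    (PySem.List.max? ((0 : Int) :: vals) id).getD 0 = vals.foldl max 0 := by
  unfold PySem.List.max?
  simp only [List.foldl_cons]
  rw [pvFoldF _ (fun q x => by
      show (if id q < id x then some x else some q) = some (max q x)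
      split_ifs with h
      · exact congrArg some (max_eq_right (le_of_lt h)).symm
      · exact congrArg some (max_eq_left (not_lt.mp h)).symm) vals 0]
  rfl

-- fold-shift: foldl max from a merged seed
theorem pvFoldShift (zs : List Int) : ∀ (a b : Int),
    zs.foldl max (max a b) = max a (zs.foldl max b) := by
  induction zs with
  | nil => intro a b; rfl
  | cons z zs ih =>
    intro a b
    simp only [List.foldl_cons, max_assoc]
    exact ih a (max b z)

-- splicing two adjacent segments
theorem pvSeg_append (res : List (List Int)) (b c : Int) (_h0 : 0 ≤ b) (hbc : b ≤ c) :
    pvSeg res 0 c = pvSeg res 0 b ++ pvSeg res b c := by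
  unfold pvSeg
  rw [← List.map_append]
  congr 1
  simp only [Int.toNat_zero, List.drop_zero, Nat.sub_zero]
  conv_lhs => rw [show c.toNat = b.toNat + (c.toNat - b.toNat) from by omega]
  rw [List.take_add]

-- cascade step: max of a prefix max and the next window max is the longer prefix max
theorem pvPrefixStep (res : List (List Int)) (b c : Int) (h0 : 0 ≤ b) (hbc : b ≤ c) :
    max ((pvSeg res 0 b).foldl max 0) ((pvSeg res b c).foldl max 0)
      = (pvSeg res 0 c).foldl max 0 := by
  rw [pvSeg_append res b c h0 hbc, List.foldl_append]
  have hnn : (0 : Int) ≤ (pvSeg res 0 b).foldl max 0 := (PySem.List.le_foldl_max _ _).1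
  calc max ((pvSeg res 0 b).foldl max 0) ((pvSeg res b c).foldl max 0)
      = (pvSeg res b c).foldl max (max ((pvSeg res 0 b).foldl max 0) 0) := by
        rw [pvFoldShift]
    _ = (pvSeg res b c).foldl max ((pvSeg res 0 b).foldl max 0) := by
        rw [max_eq_left hnn]

-- B's slice (with natural literal bounds) is pvSeg
theorem pvSlice_seg (res : List (List Int)) (a b : Nat) :
    (PySem.List.slice res (some (a : Int)) (some (b : Int))).map
      (fun row => (PySem.List.pyGet? row 0).getD 0) = pvSeg res (a : Int) (b : Int) := by
  rw [PySem.List.slice_natCast]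
  unfold pvSeg
  simp

theorem pvMain (res : List (List Int)) :
    day_xg_calculate res = day_xg_calculate_alt res := by
  have hA := pvLoopA_eq res 0 0 0 0 0 0 0 (le_refl 0) (by norm_num)
  norm_num at hA
  have hs12 : (PySem.List.slice res (some (10:Int)) (some (20:Int))).map (fun row => (PySem.List.pyGet? row 0).getD 0) = pvSeg res 10 20 := by simpa using pvSlice_seg res 10 20
  have hs23 : (PySem.List.slice res (some (20:Int)) (some (30:Int))).map (fun row => (PySem.List.pyGet? row 0).getD 0) = pvSeg res 20 30 := by simpa using pvSlice_seg res 20 30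
  have hs34 : (PySem.List.slice res (some (30:Int)) (some (40:Int))).map (fun row => (PySem.List.pyGet? row 0).getD 0) = pvSeg res 30 40 := by simpa using pvSlice_seg res 30 40
  have hs45 : (PySem.List.slice res (some (40:Int)) (some (50:Int))).map (fun row => (PySem.List.pyGet? row 0).getD 0) = pvSeg res 40 50 := by simpa using pvSlice_seg res 40 50
  have hs56 : (PySem.List.slice res (some (50:Int)) (some (60:Int))).map (fun row => (PySem.List.pyGet? row 0).getD 0) = pvSeg res 50 60 := by simpa using pvSlice_seg res 50 60
  unfold day_xg_calculate day_xg_calculate_alt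
  rw [hA]
  rw [show PySem.List.pyRange 0 6 1 = [0,1,2,3,4,5] from by decide]
  simp only [List.foldl_cons, List.foldl_nil]
  norm_num [pvMaxZero]
  have hp10 : (PySem.List.slice res none (some (10:Int))).map (fun row => (PySem.List.pyGet? row 0).getD 0) = pvSeg res 0 10 := by
    rw [← PySem.List.slice_zero_start]; simpa using pvSlice_seg res 0 10
  have hp20 : (PySem.List.slice res none (some (20:Int))).map (fun row => (PySem.List.pyGet? row 0).getD 0) = pvSeg res 0 20 := by
    rw [← PySem.List.slice_zero_start]; simpa using pvSlice_seg res 0 20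
  have hp30 : (PySem.List.slice res none (some (30:Int))).map (fun row => (PySem.List.pyGet? row 0).getD 0) = pvSeg res 0 30 := by
    rw [← PySem.List.slice_zero_start]; simpa using pvSlice_seg res 0 30
  have hp40 : (PySem.List.slice res none (some (40:Int))).map (fun row => (PySem.List.pyGet? row 0).getD 0) = pvSeg res 0 40 := by
    rw [← PySem.List.slice_zero_start]; simpa using pvSlice_seg res 0 40
  have hp50 : (PySem.List.slice res none (some (50:Int))).map (fun row => (PySem.List.pyGet? row 0).getD 0) = pvSeg res 0 50 := by
    rw [← PySem.List.slice_zero_start]; simpa using pvSlice_seg res 0 50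
  have hp60 : (PySem.List.slice res none (some (60:Int))).map (fun row => (PySem.List.pyGet? row 0).getD 0) = pvSeg res 0 60 := by
    rw [← PySem.List.slice_zero_start]; simpa using pvSlice_seg res 0 60
  have p2 := pvPrefixStep res 10 20 (by norm_num) (by norm_num)
  have p3 : max (List.foldl max 0 (pvSeg res 0 10)) (max (List.foldl max 0 (pvSeg res 10 20)) (List.foldl max 0 (pvSeg res 20 30))) = List.foldl max 0 (pvSeg res 0 30) := by
    rw [← max_assoc, p2]
    exact pvPrefixStep res 20 30 (by norm_num) (by norm_num)
  have p4 : max (List.foldl max 0 (pvSeg res 0 10)) (max (List.foldl max 0 (pvSeg res 10 20)) (max (List.foldl max 0 (pvSeg res 20 30)) (List.foldl max 0 (pvSeg res 30 40)))) = List.foldl max 0 (pvSeg res 0 40) := by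
    rw [← max_assoc, ← max_assoc, p2, pvPrefixStep res 20 30 (by norm_num) (by norm_num)]
    exact pvPrefixStep res 30 40 (by norm_num) (by norm_num)
  have p5 : max (List.foldl max 0 (pvSeg res 0 10)) (max (List.foldl max 0 (pvSeg res 10 20)) (max (List.foldl max 0 (pvSeg res 20 30)) (max (List.foldl max 0 (pvSeg res 30 40)) (List.foldl max 0 (pvSeg res 40 50))))) = List.foldl max 0 (pvSeg res 0 50) := by
    rw [← max_assoc, ← max_assoc, ← max_assoc, p2, pvPrefixStep res 20 30 (by norm_num) (by norm_num), pvPrefixStep res 30 40 (by norm_num) (by norm_num)]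
    exact pvPrefixStep res 40 50 (by norm_num) (by norm_num)
  have p6 : max (List.foldl max 0 (pvSeg res 0 10)) (max (List.foldl max 0 (pvSeg res 10 20)) (max (List.foldl max 0 (pvSeg res 20 30)) (max (List.foldl max 0 (pvSeg res 30 40)) (max (List.foldl max 0 (pvSeg res 40 50)) (List.foldl max 0 (pvSeg res 50 60)))))) = List.foldl max 0 (pvSeg res 0 60) := by
    rw [← max_assoc, ← max_assoc, ← max_assoc, ← max_assoc, p2, pvPrefixStep res 20 30 (by norm_num) (by norm_num), pvPrefixStep res 30 40 (by norm_num) (by norm_num), pvPrefixStep res 40 50 (by norm_num) (by norm_num)]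
    exact pvPrefixStep res 50 60 (by norm_num) (by norm_num)
  have kt10 : PySem.Int.toStr 10 = "10" := by decide
  have kt20 : PySem.Int.toStr 20 = "20" := by decide
  have kt30 : PySem.Int.toStr 30 = "30" := by decide
  have kt40 : PySem.Int.toStr 40 = "40" := by decide
  have kt50 : PySem.Int.toStr 50 = "50" := by decide
  have kt60 : PySem.Int.toStr 60 = "60" := by decide
  by_cases h60 : 60 ≤ res.length
  · rw [show (if 60 ≤ res.length then (6:Int) else max 1 (((res.length:Int) - 1) / 10)) = 6 from if_pos h60]
    simp only [if_pos h60]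
    norm_num
    rw [hp10, hp20, hp30, hp40, hp50, hp60, p2, p3, p4, p5, p6, kt10, kt20, kt30, kt40, kt50, kt60]
  · by_cases h50 : 50 < res.length
    · rw [show (if 60 ≤ res.length then (6:Int) else max 1 (((res.length:Int) - 1) / 10)) = 5 from by
        rw [if_neg h60]
        rw [show ((res.length:Int) - 1) / 10 = 5 from by omega]
        norm_num]
      simp only [if_neg h60, if_pos h50]
      norm_num
      rw [hp10, hp20, hp30, hp40, hp50, hs56, p2, p3, p4, p5, kt10, kt20, kt30, kt40, kt50, kt60]
    · by_cases h40 : 40 < res.length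
      · rw [show (if 60 ≤ res.length then (6:Int) else max 1 (((res.length:Int) - 1) / 10)) = 4 from by
          rw [if_neg h60]
          rw [show ((res.length:Int) - 1) / 10 = 4 from by omega]
          norm_num]
        simp only [if_neg h60, if_neg h50, if_pos h40]
        norm_num
        rw [hp10, hp20, hp30, hp40, hs45, hs56, p2, p3, p4, kt10, kt20, kt30, kt40, kt50, kt60]
      · by_cases h30 : 30 < res.length
        · rw [show (if 60 ≤ res.length then (6:Int) else max 1 (((res.length:Int) - 1) / 10)) = 3 from by
            rw [if_neg h60]
            rw [show ((res.length:Int) - 1) / 10 = 3 from by omega]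
            norm_num]
          simp only [if_neg h60, if_neg h50, if_neg h40, if_pos h30]
          norm_num
          rw [hp10, hp20, hp30, hs34, hs45, hs56, p2, p3, kt10, kt20, kt30, kt40, kt50, kt60]
        · by_cases h20 : 20 < res.length
          · rw [show (if 60 ≤ res.length then (6:Int) else max 1 (((res.length:Int) - 1) / 10)) = 2 from by
              rw [if_neg h60]
              rw [show ((res.length:Int) - 1) / 10 = 2 from by omega]
              norm_num]
            simp only [if_neg h60, if_neg h50, if_neg h40, if_neg h30, if_pos h20]
            norm_num
            rw [hp10, hp20, hs23, hs34, hs45, hs56, p2, kt10, kt20, kt30, kt40, kt50, kt60]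
          · rw [show (if 60 ≤ res.length then (6:Int) else max 1 (((res.length:Int) - 1) / 10)) = 1 from by
              rw [if_neg h60]
              rw [max_eq_left (show ((res.length:Int) - 1) / 10 ≤ 1 from by omega)]]
            simp only [if_neg h60, if_neg h50, if_neg h40, if_neg h30, if_neg h20]
            norm_num
            rw [hp10, hs12, hs23, hs34, hs45, hs56, kt10, kt20, kt30, kt40, kt50, kt60]

-- ===== VERDICT (by name: the statement is the Claim_ definition above) =====
theorem day_xg_calculate_spec : Claim_equal_day_xg_calculate := by
  intro res _ _
  exact pvMain res
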